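-- pv_equiv track=rewrite | github.com/5zo-s-magician/CodingTest | KHJ/baekjoon/DynamicProgramming/220818_계단오르기_2579.py | getMaxStairSum
-- ===== SOURCE A (Python) =====
-- def getMaxStairSum(stairs, N):
--     dp = [0 for i in range(N+1)]
--     for i in range(1, N+1):
--         if i == 1:
--             dp[1] = stairs[1]
--         elif i == 2:
--             dp[2] = stairs[1]+stairs[2]
--         else:
--             dp[i] = max(dp[i-2]+stairs[i], dp[i-3]+stairs[i-1]+stairs[i])
--     return dp[len(stairs)-1]
-- ===== SOURCE B (Python) =====
-- def getMaxStairSum(stairs, N):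
--     # Complement formulation: instead of maximizing the sum of stepped stairs,
--     # minimize the total of the SKIPPED stairs and subtract it from the prefix
--     # sum: answer = (stairs[1]+...+stairs[i]) - m[i], where m[i] is the minimal
--     # skippable total for a valid climb ending on stair i
--     # (m[i] = min(m[i-2]+stairs[i-1], m[i-3]+stairs[i-2]); skipping nothing on
--     # the first two stairs matches the base cases).
--     P = [0] * (N + 1)
--     for i in range(1, N + 1):
--         P[i] = P[i - 1] + stairs[i]
--     m = [0] * (N + 1)
--     for i in range(3, N + 1):
--         m[i] = min(m[i - 2] + stairs[i - 1], m[i - 3] + stairs[i - 2])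
--     k = len(stairs) - 1
--     return P[k] - m[k]
-- ===== Notes on version B (the rewrite author's own statement) =====
-- stated objective: alternative
-- what changed: Replaced A's max-over-kept-stairs DP with the complement formulation: a prefix-sum pass plus a min-over-SKIPPED-stairs DP m[i]=min(m[i-2]+stairs[i-1], m[i-3]+stairs[i-2]), returning prefix_sum - min_skipped; the max recurrence over kept sums disappears.
import Mathlib
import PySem

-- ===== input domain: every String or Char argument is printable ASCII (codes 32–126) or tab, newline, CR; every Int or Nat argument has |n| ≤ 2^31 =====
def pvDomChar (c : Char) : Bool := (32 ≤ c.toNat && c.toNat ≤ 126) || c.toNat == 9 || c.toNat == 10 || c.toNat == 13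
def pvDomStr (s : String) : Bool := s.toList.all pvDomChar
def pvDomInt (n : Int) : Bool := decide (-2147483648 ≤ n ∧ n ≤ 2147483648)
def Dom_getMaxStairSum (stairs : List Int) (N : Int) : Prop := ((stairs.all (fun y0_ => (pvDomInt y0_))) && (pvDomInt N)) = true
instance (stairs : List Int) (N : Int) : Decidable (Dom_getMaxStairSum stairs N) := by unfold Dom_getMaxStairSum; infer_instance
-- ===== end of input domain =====

-- B replaces A's max-over-kept-stairs DP by the complement formulation (prefix sums minus a
-- min-over-skipped-stairs DP); return values proved equal on Pre_.

-- ===== PORT A =====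
-- loop body of A's 'for i in range(1, N+1)'
def stepA (stairs : List Int) (dp : List Int) (i : Int) : List Int :=
  if i = 1 then PySem.List.pySetD dp 1 (PySem.List.pyGetD stairs 1 0)
  else if i = 2 then
    PySem.List.pySetD dp 2 (PySem.List.pyGetD stairs 1 0 + PySem.List.pyGetD stairs 2 0)
  else
    PySem.List.pySetD dp i
      (max (PySem.List.pyGetD dp (i-2) 0 + PySem.List.pyGetD stairs i 0)
           (PySem.List.pyGetD dp (i-3) 0 + PySem.List.pyGetD stairs (i-1) 0 + PySem.List.pyGetD stairs i 0))

def getMaxStairSum (stairs : List Int) (N : Int) : Int :=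
  let dp0 := (PySem.List.pyRange 0 (N+1) 1).map (fun _ => (0 : Int))
  let dp := (PySem.List.pyRange 1 (N+1) 1).foldl (stepA stairs) dp0
  PySem.List.pyGetD dp ((stairs.length : Int) - 1) 0

-- ===== PORT B =====
-- loop body of B's prefix-sum pass 'for i in range(1, N+1)'
def stepP (stairs : List Int) (P : List Int) (i : Int) : List Int :=
  PySem.List.pySetD P i (PySem.List.pyGetD P (i-1) 0 + PySem.List.pyGetD stairs i 0)

-- loop body of B's min-skipped pass 'for i in range(3, N+1)'
def stepM (stairs : List Int) (m : List Int) (i : Int) : List Int :=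
  PySem.List.pySetD m i
    (min (PySem.List.pyGetD m (i-2) 0 + PySem.List.pyGetD stairs (i-1) 0)
         (PySem.List.pyGetD m (i-3) 0 + PySem.List.pyGetD stairs (i-2) 0))

def getMaxStairSum_alt (stairs : List Int) (N : Int) : Int :=
  let P := (PySem.List.pyRange 1 (N+1) 1).foldl (stepP stairs) (List.replicate (N+1).toNat 0)
  let m := (PySem.List.pyRange 3 (N+1) 1).foldl (stepM stairs) (List.replicate (N+1).toNat 0)
  PySem.List.pyGetD P ((stairs.length : Int) - 1) 0 -
    PySem.List.pyGetD m ((stairs.length : Int) - 1) 0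

-- ===== PRECONDITION & SPEC =====
-- Pre_ is exactly the set of inputs on which the Python A returns (elsewhere it raises IndexError):
-- with N ≥ 1 it needs stairs[1..N] and returns dp[len(stairs)-1], forcing len(stairs) = N+1;
-- with N = 0 the returned index len(stairs)-1 must hit the one-element dp, forcing len(stairs) ≤ 1;
-- with N < 0 the dp list is empty and the final lookup always raises.
def Pre_getMaxStairSum (stairs : List Int) (N : Int) : Prop :=
  (1 ≤ N ∧ (stairs.length : Int) = N + 1) ∨ (N = 0 ∧ stairs.length ≤ 1)
instance (stairs : List Int) (N : Int) : Decidable (Pre_getMaxStairSum stairs N) := by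
  unfold Pre_getMaxStairSum; infer_instance
def pvWitness_getMaxStairSum : List Int × Int := ([0, 10, 20, 15], 3)

def Spec_getMaxStairSum (stairs : List Int) (N : Int) (out : Int) : Prop := out = getMaxStairSum_alt stairs N
instance (stairs : List Int) (N : Int) (out : Int) : Decidable (Spec_getMaxStairSum stairs N out) := by unfold Spec_getMaxStairSum; infer_instance

-- ===== CLAIM (what is proved, stated in full; the proofs are below) =====
def Claim_equal_getMaxStairSum : Prop := ∀ (stairs : List Int) (N : Int), Dom_getMaxStairSum stairs N → Pre_getMaxStairSum stairs N → Spec_getMaxStairSum stairs N (getMaxStairSum stairs N)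

-- ===== LEMMAS AND PROOFS =====

-- the dp recurrence of A, as a function of the stair index
def dspec (stairs : List Int) : Nat → Int
  | 0 => 0
  | 1 => stairs.getD 1 0
  | 2 => stairs.getD 1 0 + stairs.getD 2 0
  | (j+3) => max (dspec stairs (j+1) + stairs.getD (j+3) 0)
                 (dspec stairs j + stairs.getD (j+2) 0 + stairs.getD (j+3) 0)

-- the prefix sums P of B
def Pspec (stairs : List Int) : Nat → Int
  | 0 => 0
  | (i+1) => Pspec stairs i + stairs.getD (i+1) 0

-- the min-skipped values m of B
def mspec (stairs : List Int) : Nat → Int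
  | 0 => 0
  | 1 => 0
  | 2 => 0
  | (j+3) => min (mspec stairs (j+1) + stairs.getD (j+2) 0)
                 (mspec stairs j + stairs.getD (j+1) 0)

-- prefix of A's loop
def dpA (stairs dp0 : List Int) (k : Nat) : List Int :=
  (PySem.List.pyRange 1 ((k:Int)+1) 1).foldl (stepA stairs) dp0

-- prefix of B's first loop
def dpP (stairs P0 : List Int) (k : Nat) : List Int :=
  (PySem.List.pyRange 1 ((k:Int)+1) 1).foldl (stepP stairs) P0

-- prefix of B's second loop
def dpM (stairs m0 : List Int) (k : Nat) : List Int :=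
  (PySem.List.pyRange 3 ((k:Int)+1) 1).foldl (stepM stairs) m0

lemma dpA_zero (stairs dp0 : List Int) : dpA stairs dp0 0 = dp0 := by
  simp [dpA, PySem.List.pyRange_one_eq_nil]

lemma dpA_succ (stairs dp0 : List Int) (k : Nat) :
    dpA stairs dp0 (k+1) = stepA stairs (dpA stairs dp0 k) ((k:Int)+1) := by
  unfold dpA
  rw [show ((k+1:Nat):Int) + 1 = ((k:Int)+1) + 1 by push_cast; ring,
      PySem.List.pyRange_one_succ_right (by omega), List.foldl_append]
  simp

lemma dpP_succ (stairs P0 : List Int) (k : Nat) :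
    dpP stairs P0 (k+1) = stepP stairs (dpP stairs P0 k) ((k:Int)+1) := by
  unfold dpP
  rw [show ((k+1:Nat):Int) + 1 = ((k:Int)+1) + 1 by push_cast; ring,
      PySem.List.pyRange_one_succ_right (by omega), List.foldl_append]
  simp

lemma dpM_succ (stairs m0 : List Int) (k : Nat) (hk : 2 ≤ k) :
    dpM stairs m0 (k+1) = stepM stairs (dpM stairs m0 k) ((k:Int)+1) := by
  unfold dpM
  rw [show ((k+1:Nat):Int) + 1 = ((k:Int)+1) + 1 by push_cast; ring,
      PySem.List.pyRange_one_succ_right (by omega), List.foldl_append]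
  simp

lemma getD_map_const (l : List Int) (j : Nat) : (l.map (fun _ => (0:Int))).getD j 0 = 0 := by
  simp [List.getD]

lemma pyGetD_set (xs : List Int) (i j : Nat) (v : Int) (hi : i < xs.length) :
    PySem.List.pyGetD (xs.set i v) (j:Int) 0 = if j = i then v else PySem.List.pyGetD xs (j:Int) 0 := by
  have h := PySem.List.pyGetD_pySetD_natCast xs i j v 0 hi
  rwa [PySem.List.pySetD_natCast] at h

lemma getD_set' (xs : List Int) (i j : Nat) (v : Int) (hi : i < xs.length) :
    (xs.set i v).getD j 0 = if j = i then v else xs.getD j 0 := by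
  have h := pyGetD_set xs i j v hi
  simpa using h

lemma A_inv (stairs dp0 : List Int) (n : Nat) (h0 : dp0.length = n+1)
    (hz : ∀ j : Nat, PySem.List.pyGetD dp0 (j:Int) 0 = 0) :
    ∀ k : Nat, k ≤ n →
      (dpA stairs dp0 k).length = n+1 ∧
      ∀ j : Nat, PySem.List.pyGetD (dpA stairs dp0 k) (j:Int) 0 =
        if 1 ≤ j ∧ j ≤ k then dspec stairs j else 0 := by
  intro k
  induction k with
  | zero =>
    intro _
    rw [dpA_zero]
    refine ⟨h0, fun j => ?_⟩
    rw [hz j]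
    split
    · omega
    · rfl
  | succ k ih =>
    intro hk1
    obtain ⟨hlen, hval⟩ := ih (by omega)
    rw [dpA_succ]
    unfold stepA
    rcases k with _ | _ | k
    · -- i = 1
      rw [if_pos (by norm_num)]
      refine ⟨by simpa using hlen, fun j => ?_⟩
      rw [show (1:Int) = ((1:Nat):Int) by norm_num,
          PySem.List.pySetD_natCast, pyGetD_set _ _ _ _ (by rw [hlen]; omega),
          PySem.List.pyGetD_natCast]
      by_cases hj : j = 1
      · subst hj; simp [dspec]
      · rw [if_neg hj, hval j]
        split_ifs <;> first | rfl | omega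
    · -- i = 2
      rw [if_neg (by norm_num), if_pos (by norm_num)]
      refine ⟨by simpa using hlen, fun j => ?_⟩
      rw [show (2:Int) = ((2:Nat):Int) by norm_num,
          show (1:Int) = ((1:Nat):Int) by norm_num,
          PySem.List.pySetD_natCast, pyGetD_set _ _ _ _ (by rw [hlen]; omega),
          PySem.List.pyGetD_natCast, PySem.List.pyGetD_natCast]
      by_cases hj : j = 2
      · subst hj; simp [dspec]
      · rw [if_neg hj, hval j]
        split_ifs <;> first | rfl | omega
    · -- i = k+3
      rw [if_neg (by push_cast; omega), if_neg (by push_cast; omega)]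
      have e1 : ((k+1+1:Nat):Int) + 1 = ((k+3:Nat):Int) := by push_cast; ring
      have e2 : ((k+3:Nat):Int) - 2 = ((k+1:Nat):Int) := by push_cast; ring
      have e3 : ((k+3:Nat):Int) - 3 = ((k:Nat):Int) := by push_cast; ring
      have e4 : ((k+3:Nat):Int) - 1 = ((k+2:Nat):Int) := by push_cast; ring
      rw [e1, e2, e3, e4]
      simp only [PySem.List.pySetD_natCast, PySem.List.pyGetD_natCast]
      have hval' : ∀ j : Nat, (dpA stairs dp0 (k+1+1)).getD j 0 =
          if 1 ≤ j ∧ j ≤ k+1+1 then dspec stairs j else 0 := fun j => by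
        rw [← PySem.List.pyGetD_natCast]; exact hval j
      rw [hval' (k+1), hval' k, if_pos (by omega)]
      have hvk : (if 1 ≤ k ∧ k ≤ k+1+1 then dspec stairs k else 0) = dspec stairs k := by
        split
        · rfl
        · have hk0 : k = 0 := by omega
          subst hk0; simp [dspec]
      rw [hvk]
      constructor
      · simp [hlen]
      · intro j
        rw [getD_set' _ _ _ _ (by rw [hlen]; omega)]
        by_cases hj : j = k+3
        · subst hj
          rw [if_pos rfl, if_pos (by omega)]
          rfl
        · rw [if_neg hj, hval' j]
          split_ifs <;> first | rfl | omega

lemma P_inv (stairs P0 : List Int) (n : Nat) (h0 : P0.length = n+1)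
    (hz : ∀ j : Nat, PySem.List.pyGetD P0 (j:Int) 0 = 0) :
    ∀ k : Nat, k ≤ n →
      (dpP stairs P0 k).length = n+1 ∧
      ∀ j : Nat, PySem.List.pyGetD (dpP stairs P0 k) (j:Int) 0 =
        if 1 ≤ j ∧ j ≤ k then Pspec stairs j else 0 := by
  intro k
  induction k with
  | zero =>
    intro _
    have : dpP stairs P0 0 = P0 := by simp [dpP, PySem.List.pyRange_one_eq_nil]
    rw [this]
    refine ⟨h0, fun j => ?_⟩
    rw [hz j]
    split
    · omega
    · rfl
  | succ k ih =>
    intro hk1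
    obtain ⟨hlen, hval⟩ := ih (by omega)
    rw [dpP_succ]
    unfold stepP
    have e1 : ((k:Nat):Int) + 1 = ((k+1:Nat):Int) := by push_cast; ring
    have e2 : ((k+1:Nat):Int) - 1 = ((k:Nat):Int) := by push_cast; ring
    rw [e1, e2]
    simp only [PySem.List.pySetD_natCast, PySem.List.pyGetD_natCast]
    have hval' : ∀ j : Nat, (dpP stairs P0 k).getD j 0 =
        if 1 ≤ j ∧ j ≤ k then Pspec stairs j else 0 := fun j => by
      rw [← PySem.List.pyGetD_natCast]; exact hval j
    rw [hval' k]
    have hvk : (if 1 ≤ k ∧ k ≤ k then Pspec stairs k else 0) = Pspec stairs k := by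
      split
      · rfl
      · have hk0 : k = 0 := by omega
        subst hk0; simp [Pspec]
    rw [hvk]
    constructor
    · simp [hlen]
    · intro j
      rw [getD_set' _ _ _ _ (by rw [hlen]; omega)]
      by_cases hj : j = k+1
      · subst hj
        rw [if_pos rfl, if_pos (by omega)]
        rfl
      · rw [if_neg hj, hval' j]
        split_ifs <;> first | rfl | omega

-- mspec is 0 at 0, 1 and 2, so the invariant's else-branch reads back mspec too
lemma mspec_small (stairs : List Int) (j : Nat) (h : j ≤ 2) : mspec stairs j = 0 := by
  interval_cases j <;> rfl

lemma M_inv (stairs m0 : List Int) (n : Nat) (h0 : m0.length = n+1)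
    (hz : ∀ j : Nat, PySem.List.pyGetD m0 (j:Int) 0 = 0) :
    ∀ k : Nat, 2 ≤ k → k ≤ n →
      (dpM stairs m0 k).length = n+1 ∧
      ∀ j : Nat, PySem.List.pyGetD (dpM stairs m0 k) (j:Int) 0 =
        if 3 ≤ j ∧ j ≤ k then mspec stairs j else 0 := by
  intro k
  induction k with
  | zero => omega
  | succ k ih =>
    intro hk2 hk1
    by_cases hk : k = 1
    · -- k+1 = 2: the range 3..3 is empty
      subst hk
      have : dpM stairs m0 2 = m0 := by
        simp [dpM, PySem.List.pyRange_one_eq_nil]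
      rw [show (1:Nat)+1 = 2 from rfl, this]
      refine ⟨h0, fun j => ?_⟩
      rw [hz j]
      split
      · omega
      · rfl
    · obtain ⟨hlen, hval⟩ := ih (by omega) (by omega)
      rw [dpM_succ _ _ _ (by omega)]
      unfold stepM
      obtain ⟨k', rfl⟩ : ∃ k', k = k' + 2 := ⟨k - 2, by omega⟩
      have e1 : ((k'+2:Nat):Int) + 1 = ((k'+3:Nat):Int) := by push_cast; ring
      have e2 : ((k'+3:Nat):Int) - 2 = ((k'+1:Nat):Int) := by push_cast; ring
      have e3 : ((k'+3:Nat):Int) - 3 = ((k':Nat):Int) := by push_cast; ring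
      have e4 : ((k'+3:Nat):Int) - 1 = ((k'+2:Nat):Int) := by push_cast; ring
      rw [e1, e2, e3, e4]
      simp only [PySem.List.pySetD_natCast, PySem.List.pyGetD_natCast]
      have hval' : ∀ j : Nat, (dpM stairs m0 (k'+2)).getD j 0 =
          if 3 ≤ j ∧ j ≤ k'+2 then mspec stairs j else 0 := fun j => by
        rw [← PySem.List.pyGetD_natCast]; exact hval j
      have hr1 : (dpM stairs m0 (k'+2)).getD (k'+1) 0 = mspec stairs (k'+1) := by
        rw [hval' (k'+1)]
        split
        · rfl
        · rw [mspec_small stairs (k'+1) (by omega)]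
      have hr2 : (dpM stairs m0 (k'+2)).getD k' 0 = mspec stairs k' := by
        rw [hval' k']
        split
        · rfl
        · rw [mspec_small stairs k' (by omega)]
      rw [hr1, hr2]
      constructor
      · simp [hlen]
      · intro j
        rw [getD_set' _ _ _ _ (by rw [hlen]; omega)]
        by_cases hj : j = k'+3
        · subst hj
          rw [if_pos rfl, if_pos (by omega)]
          rfl
        · rw [if_neg hj, hval' j]
          split_ifs <;> first | rfl | omega

-- the complement identity: A's kept-max equals prefix sum minus B's skipped-min
lemma dspec_eq (stairs : List Int) : ∀ i : Nat, dspec stairs i = Pspec stairs i - mspec stairs i := by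
  intro i
  induction i using Nat.strong_induction_on with
  | _ i ih =>
    match i with
    | 0 => rfl
    | 1 => simp [dspec, Pspec, mspec]
    | 2 => simp [dspec, Pspec, mspec]
    | (j+3) =>
      have h1 := ih (j+1) (by omega)
      have h2 := ih j (by omega)
      have eP1 : Pspec stairs (j+3) =
          Pspec stairs (j+1) + stairs.getD (j+2) 0 + stairs.getD (j+3) 0 := by
        simp [Pspec]
      have eP2 : Pspec stairs (j+1) = Pspec stairs j + stairs.getD (j+1) 0 := rfl
      rw [show dspec stairs (j+3) = max (dspec stairs (j+1) + stairs.getD (j+3) 0)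
            (dspec stairs j + stairs.getD (j+2) 0 + stairs.getD (j+3) 0) from rfl,
          show mspec stairs (j+3) = min (mspec stairs (j+1) + stairs.getD (j+2) 0)
            (mspec stairs j + stairs.getD (j+1) 0) from rfl,
          h1, h2]
      omega

theorem getMaxStairSum_spec : Claim_equal_getMaxStairSum := by
  intro stairs N _ hpre
  unfold Spec_getMaxStairSum
  rcases hpre with ⟨hN, hlen⟩ | ⟨hN, hlen⟩
  · -- main case: N >= 1, len = N+1
    obtain ⟨n, rfl⟩ : ∃ n : Nat, N = (n:Int) := ⟨N.toNat, by omega⟩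
    have hn : 1 ≤ n := by omega
    have hlen' : stairs.length = n + 1 := by omega
    have hA : getMaxStairSum stairs (n:Int) =
        PySem.List.pyGetD
          (dpA stairs ((PySem.List.pyRange 0 ((n:Int)+1) 1).map (fun _ => (0:Int))) n)
          ((stairs.length : Int) - 1) 0 := rfl
    have hB : getMaxStairSum_alt stairs (n:Int) =
        PySem.List.pyGetD (dpP stairs (List.replicate ((n:Int)+1).toNat 0) n)
          ((stairs.length : Int) - 1) 0 -
        PySem.List.pyGetD (dpM stairs (List.replicate ((n:Int)+1).toNat 0) n)
          ((stairs.length : Int) - 1) 0 := rfl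
    rw [hA, hB]
    have h0A : ((PySem.List.pyRange 0 ((n:Int)+1) 1).map (fun _ => (0:Int))).length = n + 1 := by
      simp [PySem.List.length_pyRange_one]
    have hzA : ∀ j : Nat,
        PySem.List.pyGetD ((PySem.List.pyRange 0 ((n:Int)+1) 1).map (fun _ => (0:Int))) (j:Int) 0 = 0 := by
      intro j
      rw [PySem.List.pyGetD_natCast]
      exact getD_map_const _ j
    have h0B : (List.replicate ((n:Int)+1).toNat (0:Int)).length = n + 1 := by
      simp
    have hzB : ∀ j : Nat,
        PySem.List.pyGetD (List.replicate ((n:Int)+1).toNat (0:Int)) (j:Int) 0 = 0 := by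
      intro j
      rw [PySem.List.pyGetD_natCast]
      simp [List.getD]
    obtain ⟨-, hvalA⟩ := A_inv stairs _ n h0A hzA n le_rfl
    obtain ⟨-, hvalP⟩ := P_inv stairs _ n h0B hzB n le_rfl
    have eidx : (stairs.length : Int) - 1 = ((n:Nat):Int) := by omega
    rw [eidx, hvalA n, if_pos (by omega), hvalP n, if_pos (by omega)]
    by_cases hn2 : 2 ≤ n
    · obtain ⟨-, hvalM⟩ := M_inv stairs _ n h0B hzB n hn2 le_rfl
      rw [hvalM n]
      rw [dspec_eq]
      split
      · rfl
      · rw [mspec_small stairs n (by omega)]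
    · -- n = 1: the m-loop range is empty
      have hn1 : n = 1 := by omega
      subst hn1
      have hm : dpM stairs (List.replicate ((((1:Nat):Int))+1).toNat 0) 1 =
          List.replicate ((((1:Nat):Int))+1).toNat 0 := by
        simp [dpM, PySem.List.pyRange_one_eq_nil]
      rw [hm, hzB 1, dspec_eq, mspec_small stairs 1 (by omega)]
  · -- degenerate case: N = 0, len(stairs) <= 1
    subst hN
    rcases stairs with _ | ⟨a, rest⟩
    · decide
    · rcases rest with _ | ⟨b, rest⟩
      · simp only [getMaxStairSum, getMaxStairSum_alt]
        rw [show PySem.List.pyRange 1 ((0:Int)+1) 1 = [] from PySem.List.pyRange_one_eq_nil (by norm_num)]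
        simp [PySem.List.pyGetD_ofNat']
      · simp at hlen
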